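-- pv_equiv track=rewrite | github.com/miinjunn/Hackkerrank-Area | HackerRank Certificate/Problem Sorving (Basic)/Balanced_System_Files_Partition.py | mostBalancedPartition
-- ===== SOURCE A (Python) =====
-- def mostBalancedPartition(parent, files_size):
--     def size_tree(i):
--         size_sums[i] = files_size[i] + \
--             sum(size_tree(j) for j in child[i])
--         return size_sums[i]
--
--     n = len(parent)
--
--     child = [[] for i in range(n)]
--
--     for i in range(1, n):
--         child[parent[i]].append(i)
--
--     size_sums = [None for i in range(n)]
--
--     size_tree(0)
--     return min(abs(size_sums[0] - 2 * ss) for ss in size_sums[1:])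
-- ===== SOURCE B (Python) =====
-- def mostBalancedPartition(parent, files_size):
--     # Walk each node's ancestor chain up to the root, adding its file size to
--     # every node on the way: totals[k] ends up as the subtree sum of k.
--     # No adjacency lists and no recursion.
--     n = len(parent)
--     totals = [0] * n
--     for j in range(n):
--         k = j
--         totals[k] += files_size[j]
--         while k != 0:
--             k = parent[k]
--             totals[k] += files_size[j]
--     return min(abs(totals[0] - 2 * s) for s in totals[1:])
-- ===== Notes on version B (the rewrite author's own statement) =====
-- stated objective: alternative
-- what changed: Replaces A's child-adjacency-list construction plus recursive DFS (size_tree) with a direct ancestor-chain accumulation (each node's file size is added to every node on its chain to the root); Pre_ excludes parent entries equal to -len(parent), which Python's list wraparound makes A read as the root while B's chain walk does not stop there, and non-tree inputs, on which A raises.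
-- outside the precondition, e.g. on mostBalancedPartition([0, -3, 0], [3, 1, 2]): A returns 2, B returns 3; on mostBalancedPartition([1, -3, 0], [3, 1, 2]): A returns 2, B does not finish within the time limit
import Mathlib
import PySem

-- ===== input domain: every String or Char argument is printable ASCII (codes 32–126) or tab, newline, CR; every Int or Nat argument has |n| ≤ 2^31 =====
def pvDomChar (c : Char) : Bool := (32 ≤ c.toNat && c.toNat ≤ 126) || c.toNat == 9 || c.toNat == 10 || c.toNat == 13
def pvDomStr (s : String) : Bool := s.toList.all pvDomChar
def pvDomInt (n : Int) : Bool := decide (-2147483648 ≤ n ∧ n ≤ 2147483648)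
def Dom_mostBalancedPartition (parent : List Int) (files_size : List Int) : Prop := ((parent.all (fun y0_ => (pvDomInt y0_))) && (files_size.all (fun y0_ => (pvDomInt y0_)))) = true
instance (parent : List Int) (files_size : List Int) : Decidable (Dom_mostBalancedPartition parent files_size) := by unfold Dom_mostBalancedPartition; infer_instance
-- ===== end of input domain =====

-- B replaces A's child-list construction + recursive DFS by a per-node ancestor-chain
-- accumulation (each node's file size is added to every node on its chain to the root);
-- objective: alternative decomposition, no recursion and no adjacency lists.

-- ===== PORT A =====
-- child[parent[i]].append(i) for i in range(1, n), on child = [[] for _ in range(n)]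
def pvBuildChild (parent : List Int) (n : Nat) : List (List Int) :=
  (PySem.List.pyRange 1 (n : Int) 1).foldl
    (fun child i =>
      let p := PySem.List.pyGetD parent i 0
      PySem.List.pySetD child p (PySem.List.pyGetD child p [] ++ [i]))
    (List.replicate n [])

-- size_tree(i): size_sums[i] = files_size[i] + sum(size_tree(j) for j in child[i]); return it.
-- Recursion made total by fuel (= n at the top call, enough under Pre_); state = (return, size_sums).
def pvSizeTree (child : List (List Int)) (files : List Int) :
    Nat → Int → List (Option Int) → Int × List (Option Int)
  | 0, _, sums => (0, sums)
  | Nat.succ fuel, i, sums =>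
      let step := (PySem.List.pyGetD child i []).foldl
        (fun (acc : Int × List (Option Int)) j =>
          let r := pvSizeTree child files fuel j acc.2
          (acc.1 + r.1, r.2)) ((0 : Int), sums)
      let v := PySem.List.pyGetD files i 0 + step.1
      (v, PySem.List.pySetD step.2 i (some v))

def mostBalancedPartition (parent : List Int) (files_size : List Int) : Int :=
  let n := parent.length
  let child := pvBuildChild parent n
  let sums := (pvSizeTree child files_size n 0 (List.replicate n (none : Option Int))).2
  let root := (PySem.List.pyGetD sums 0 none).getD 0
  let vals := (PySem.List.slice sums (some 1) none).map (fun o => |root - 2 * o.getD 0|)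
  (PySem.List.min? vals (fun x => x)).getD 0

-- ===== PORT B =====
-- the inner 'while k != 0' loop of Source B: step to parent[k] and add files_size[j] there;
-- fuel (= n at the call, enough under Pre_) only makes the while loop total
def pvBWalk (parent files_size : List Int) (j : Int) :
    Nat → Int → List Int → List Int
  | 0, _, totals => totals
  | Nat.succ fuel, k, totals =>
      if k = 0 then totals
      else
        let k' := PySem.List.pyGetD parent k 0
        pvBWalk parent files_size j fuel k'
          (PySem.List.pySetD totals k'
            (PySem.List.pyGetD totals k' 0 + PySem.List.pyGetD files_size j 0))

def mostBalancedPartition_alt (parent : List Int) (files_size : List Int) : Int :=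
  let n := parent.length
  let totals := (PySem.List.pyRange 0 (n : Int) 1).foldl
    (fun totals j =>
      pvBWalk parent files_size j n j
        (PySem.List.pySetD totals j
          (PySem.List.pyGetD totals j 0 + PySem.List.pyGetD files_size j 0)))
    (List.replicate n (0 : Int))
  let root := PySem.List.pyGetD totals 0 0
  let vals := (PySem.List.slice totals (some 1) none).map (fun s => |root - 2 * s|)
  (PySem.List.min? vals (fun x => x)).getD 0

-- ===== PRECONDITION & SPEC =====
-- s steps up the parent chain starting at k, absorbing at the root 0
-- (pvEpar is the node index a parent entry denotes, as the list index Python uses)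
def pvEpar (parent : List Int) (k : Nat) : Nat :=
  (PySem.Int.mod (parent.getD k 0) (parent.length : Int)).toNat

def pvItW (parent : List Int) : Nat → Nat → Nat
  | 0, k => k
  | Nat.succ s, k =>
      let m := pvItW parent s k
      if m = 0 then 0 else pvEpar parent m

-- Pre_: at least two nodes, a file size for every node, every non-root parent entry an
-- in-range Python list index EXCEPT exactly -len(parent) (that entry wraps to the root
-- for A's child[parent[i]], but B's chain walk 'while k != 0' does not stop at it and
-- misbehaves or loops forever), and every node's parent chain reaching the root (the
-- parent array describes a tree rooted at 0; otherwise A raises TypeError /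
-- RecursionError, and n < 2 raises ValueError).
def Pre_mostBalancedPartition (parent : List Int) (files_size : List Int) : Prop :=
  2 ≤ parent.length ∧ parent.length ≤ files_size.length ∧
  (∀ i : Nat, i < parent.length → 1 ≤ i →
      -(parent.length : Int) < parent.getD i 0 ∧ parent.getD i 0 < (parent.length : Int)) ∧
  (∀ i : Nat, i < parent.length → pvItW parent parent.length i = 0)
instance (parent : List Int) (files_size : List Int) : Decidable (Pre_mostBalancedPartition parent files_size) := by
  unfold Pre_mostBalancedPartition; infer_instance

def pvWitness_mostBalancedPartition : List Int × List Int := ([0, 2, 0], [3, 1, 2])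

def Spec_mostBalancedPartition (parent : List Int) (files_size : List Int) (out : Int) : Prop := out = mostBalancedPartition_alt parent files_size
instance (parent : List Int) (files_size : List Int) (out : Int) : Decidable (Spec_mostBalancedPartition parent files_size out) := by unfold Spec_mostBalancedPartition; infer_instance

-- ===== CLAIM (what is proved, stated in full; the proofs are below) =====
def Claim_equal_mostBalancedPartition : Prop := ∀ (parent : List Int) (files_size : List Int), Dom_mostBalancedPartition parent files_size → Pre_mostBalancedPartition parent files_size → Spec_mostBalancedPartition parent files_size (mostBalancedPartition parent files_size)

-- ===== LEMMAS AND PROOFS =====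

-- children of k among indices ≥ m (in increasing order)
def pvChildGe (parent : List Int) (m k : Nat) : List Nat :=
  (List.range' m (parent.length - m)).filter (fun j => decide (pvEpar parent j = k))

-- fuel-indexed subtree value, shaped like A's recursion
def pvV (parent files : List Int) : Nat → Nat → Int
  | 0, _ => 0
  | Nat.succ f, i =>
      files.getD i 0 + ((pvChildGe parent 1 i).map (pvV parent files f)).sum

-- first time the chain from k hits 0, searched up to n steps (n + 1 if never)
def pvDepGo (parent : List Int) (k : Nat) : Nat → Nat → Nat
  | 0, s => s
  | Nat.succ fuel, s => if pvItW parent s k = 0 then s else pvDepGo parent k fuel (s + 1)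

def pvDep (parent : List Int) (k : Nat) : Nat := pvDepGo parent k (parent.length + 1) 0

-- the value A stores at node k (fuel as the actual run provides it)
def pvVal (parent files : List Int) (k : Nat) : Int :=
  pvV parent files (parent.length - pvDep parent k) k

-- j's chain reaches i within n steps
def pvR (parent : List Int) (j i : Nat) : Bool :=
  (List.range (parent.length + 1)).any (fun s => pvItW parent s j == i)


lemma pvEpar_lt {parent : List Int} (h : 0 < parent.length) (k : Nat) :
    pvEpar parent k < parent.length := by
  unfold pvEpar
  have hn : (0 : Int) < (parent.length : Int) := by exact_mod_cast h
  have h1 := PySem.Int.mod_nonneg (parent.getD k 0) hn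
  have h2 := PySem.Int.mod_lt (parent.getD k 0) hn
  omega

lemma pvItW_zero (parent : List Int) (s : Nat) : pvItW parent s 0 = 0 := by
  induction s with
  | zero => rfl
  | succ t ih => simp [pvItW, ih]

lemma pvItW_lt {parent : List Int} {k : Nat} (hk : k < parent.length) (s : Nat) :
    pvItW parent s k < parent.length := by
  induction s with
  | zero => exact hk
  | succ t ih =>
      simp only [pvItW]
      by_cases h : pvItW parent t k = 0
      · simp [h]; omega
      · simp [h]
        exact pvEpar_lt (by omega) _

lemma pvItW_add (parent : List Int) (s t k : Nat) :
    pvItW parent (s + t) k = pvItW parent t (pvItW parent s k) := by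
  induction t with
  | zero => rfl
  | succ u ih =>
      have he : s + (u + 1) = (s + u) + 1 := rfl
      rw [he]
      simp only [pvItW, ih]

lemma pvItW_absorb {parent : List Int} {k s : Nat} (h : pvItW parent s k = 0)
    {t : Nat} (hst : s ≤ t) : pvItW parent t k = 0 := by
  have : t = s + (t - s) := by omega
  rw [this, pvItW_add, h, pvItW_zero]

-- a minimal chain to 0 never repeats a node
lemma pvItW_inj {parent : List Int} {k d : Nat}
    (hd0 : pvItW parent d k = 0) (hdm : ∀ s, s < d → pvItW parent s k ≠ 0)
    {a b : Nat} (hab : a < b) (hbd : b ≤ d) :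
    pvItW parent a k ≠ pvItW parent b k := by
  intro he
  have h1 : pvItW parent (a + (d - b)) k = pvItW parent (d - b) (pvItW parent a k) :=
    pvItW_add parent a (d - b) k
  have h2 : pvItW parent (b + (d - b)) k = pvItW parent (d - b) (pvItW parent b k) :=
    pvItW_add parent b (d - b) k
  have h3 : b + (d - b) = d := by omega
  rw [h3, hd0] at h2
  rw [he, ← h2] at h1
  exact hdm (a + (d - b)) (by omega) h1

-- pigeonhole: a minimal chain to 0 from a node < n has length < n
lemma pvDep_bound {parent : List Int} {k d : Nat} (hk : k < parent.length)
    (hd0 : pvItW parent d k = 0) (hdm : ∀ s, s < d → pvItW parent s k ≠ 0) :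
    d < parent.length := by
  have hnodup : ((List.range (d + 1)).map (fun s => pvItW parent s k)).Nodup := by
    rw [List.nodup_iff_injective_getElem]
    intro ⟨a, ha⟩ ⟨b, hb⟩ he
    simp only [List.getElem_map, List.getElem_range] at he
    simp only [List.length_map, List.length_range] at ha hb
    rcases Nat.lt_trichotomy a b with h | h | h
    · exact absurd he (pvItW_inj hd0 hdm h (by omega))
    · simpa using h
    · exact absurd he.symm (pvItW_inj hd0 hdm h (by omega))
  have hsub : ((List.range (d + 1)).map (fun s => pvItW parent s k)).toFinset
      ⊆ Finset.range parent.length := by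
    intro x hx
    rw [List.mem_toFinset] at hx
    obtain ⟨s, _, rfl⟩ := List.mem_map.mp hx
    exact Finset.mem_range.mpr (pvItW_lt hk s)
  have hcard := Finset.card_le_card hsub
  rw [List.toFinset_card_of_nodup hnodup] at hcard
  simp only [List.length_map, List.length_range, Finset.card_range] at hcard
  omega

lemma pvDepGo_spec (parent : List Int) (k : Nat) :
    ∀ fuel s, (∃ u, u ≤ fuel ∧ pvItW parent (s + u) k = 0) →
      pvItW parent (pvDepGo parent k fuel s) k = 0 ∧ s ≤ pvDepGo parent k fuel s ∧
      ∀ t, s ≤ t → t < pvDepGo parent k fuel s → pvItW parent t k ≠ 0 := by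
  intro fuel
  induction fuel with
  | zero =>
      intro s ⟨u, hu, h0⟩
      have hu0 : u = 0 := by omega
      subst hu0
      simp only [pvDepGo]
      exact ⟨by simpa using h0, le_refl s, fun t h1 h2 => by omega⟩
  | succ f ihf =>
      intro s ⟨u, hu, h0⟩
      by_cases hs : pvItW parent s k = 0
      · simp only [pvDepGo, if_pos hs]
        exact ⟨hs, le_refl s, fun t h1 h2 => by omega⟩
      · simp only [pvDepGo, if_neg hs]
        have hu1 : 1 ≤ u := by
          by_contra hc
          have : u = 0 := by omega
          subst this
          simp at h0
          exact hs h0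
        have hrec := ihf (s + 1) ⟨u - 1, by omega, by
          have : s + 1 + (u - 1) = s + u := by omega
          rw [this]; exact h0⟩
        refine ⟨hrec.1, by omega, ?_⟩
        intro t h1 h2
        rcases Nat.eq_or_lt_of_le h1 with he | hl
        · rw [← he]; exact hs
        · exact hrec.2.2 t (by omega) h2

-- the three defining facts of pvDep, available whenever the chain reaches 0 at all
lemma pvDep_spec {parent : List Int} {k : Nat}
    (hr : pvItW parent parent.length k = 0) :
    pvItW parent (pvDep parent k) k = 0 ∧
    (∀ s, s < pvDep parent k → pvItW parent s k ≠ 0) := by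
  have h := pvDepGo_spec parent k (parent.length + 1) 0
    ⟨parent.length, by omega, by simpa using hr⟩
  exact ⟨h.1, fun s hs => h.2.2 s (by omega) hs⟩

lemma pvDep_lt {parent : List Int} {k : Nat} (hk : k < parent.length)
    (hr : pvItW parent parent.length k = 0) :
    pvDep parent k < parent.length := by
  obtain ⟨h0, hm⟩ := pvDep_spec hr
  exact pvDep_bound hk h0 hm

lemma pvDep_zero (parent : List Int) (h2 : 0 < parent.length) : pvDep parent 0 = 0 := by
  have h := pvDepGo_spec parent 0 (parent.length + 1) 0 ⟨0, by omega, by simp [pvItW_zero]⟩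
  have he : pvDep parent 0 = pvDepGo parent 0 (parent.length + 1) 0 := rfl
  by_contra hc
  rw [he] at hc
  exact h.2.2 0 (le_refl 0) (by omega) rfl

lemma pvChildGe_mem {parent : List Int} {m k j : Nat} :
    j ∈ pvChildGe parent m k ↔ m ≤ j ∧ j < parent.length ∧ pvEpar parent j = k := by
  simp only [pvChildGe, List.mem_filter, List.mem_range'_1, decide_eq_true_eq]
  exact ⟨fun h => ⟨h.1.1, by omega, h.2⟩, fun h => ⟨⟨h.1, by omega⟩, h.2.2⟩⟩

-- a child's minimal chain is one step longer than its parent's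
lemma pvItW_one_child {parent : List Int} {i c : Nat}
    (hc1 : 1 ≤ c) (hec : pvEpar parent c = i) (s : Nat) :
    pvItW parent (1 + s) c = pvItW parent s i := by
  rw [pvItW_add parent 1 s c]
  congr 1
  simp only [pvItW]
  rw [if_neg (by omega : ¬ c = 0)]
  exact hec

lemma pvDep_child {parent : List Int} {i c : Nat}
    (hc1 : 1 ≤ c) (hec : pvEpar parent c = i)
    (hrc : pvItW parent parent.length c = 0)
    (hri : pvItW parent parent.length i = 0) :
    pvDep parent c = pvDep parent i + 1 := by
  obtain ⟨h0c, hmc⟩ := pvDep_spec hrc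
  obtain ⟨h0i, hmi⟩ := pvDep_spec hri
  have hle : pvDep parent c ≤ 1 + pvDep parent i := by
    by_contra hcon
    exact hmc (1 + pvDep parent i) (by omega) (by rw [pvItW_one_child hc1 hec]; exact h0i)
  have hpos : 0 < pvDep parent c := by
    rcases Nat.eq_zero_or_pos (pvDep parent c) with h | h
    · exfalso
      have h00 := h0c
      rw [h] at h00
      simp only [pvItW] at h00
      omega
    · exact h
  have hge : pvDep parent i ≤ pvDep parent c - 1 := by
    by_contra hcon
    refine hmi (pvDep parent c - 1) (by omega) ?_
    rw [← pvItW_one_child hc1 hec]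
    have : 1 + (pvDep parent c - 1) = pvDep parent c := by omega
    rw [this]
    exact h0c
  omega


lemma pvSet_getD {α : Type} (xs : List α) (q k : Nat) (v d : α) (hq : q < xs.length) :
    (xs.set q v).getD k d = if q = k then v else xs.getD k d := by
  by_cases h : q = k
  · subst h
    simp [List.getD_eq_getElem?_getD, List.getElem?_set_self hq]
  · simp [List.getD_eq_getElem?_getD, List.getElem?_set_ne h, h]

-- Python's xs[e] = v / xs[e] for a possibly negative in-range index is indexing at e mod len
lemma pvSetD_wrap {α : Type} (xs : List α) (e : Int) (v : α)
    (h1 : -(xs.length : Int) ≤ e) (h2 : e < xs.length) (hpos : 0 < xs.length) :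
    PySem.List.pySetD xs e v = xs.set (PySem.Int.mod e (xs.length : Int)).toNat v := by
  have hmod : PySem.Int.mod e (xs.length : Int) = e % (xs.length : Int) :=
    PySem.Int.mod_eq_emod_of_pos (by exact_mod_cast hpos)
  by_cases he : 0 ≤ e
  · have h3 : (PySem.Int.mod e (xs.length : Int)).toNat = e.toNat := by
      rw [hmod, Int.emod_eq_of_lt he h2]
    rw [PySem.List.pySetD_of_nonneg xs v he, h3]
  · have hneg : ¬ (0 ≤ e) := he
    have hidx : xs.length - (-e).toNat = (e + xs.length).toNat := by omega
    have h5 : (e + xs.length) % (xs.length : Int) = e % xs.length := by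
      have h6 := Int.add_mul_emod_self_left (a := e) (b := (xs.length : Int)) (c := 1)
      rw [mul_one] at h6
      exact h6
    have h4 : e % (xs.length : Int) = e + xs.length := by
      rw [← h5, Int.emod_eq_of_lt (by omega) (by omega)]
    have h3 : (PySem.Int.mod e (xs.length : Int)).toNat = (e + xs.length).toNat := by
      rw [hmod, h4]
    rw [h3]
    simp [PySem.List.pySetD, PySem.List.pySet?, PySem.List.pyIdx?, hneg, hidx, h1]

lemma pvGetD_wrap {α : Type} (xs : List α) (e : Int) (d : α)
    (h1 : -(xs.length : Int) ≤ e) (h2 : e < xs.length) (hpos : 0 < xs.length) :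
    PySem.List.pyGetD xs e d = xs.getD (PySem.Int.mod e (xs.length : Int)).toNat d := by
  have hmod : PySem.Int.mod e (xs.length : Int) = e % (xs.length : Int) :=
    PySem.Int.mod_eq_emod_of_pos (by exact_mod_cast hpos)
  by_cases he : 0 ≤ e
  · have h3 : (PySem.Int.mod e (xs.length : Int)).toNat = e.toNat := by
      rw [hmod, Int.emod_eq_of_lt he h2]
    rw [PySem.List.pyGetD_of_nonneg xs d he, h3]
  · have hneg : ¬ (0 ≤ e) := he
    have hidx : xs.length - (-e).toNat = (e + xs.length).toNat := by omega
    have h5 : (e + xs.length) % (xs.length : Int) = e % xs.length := by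
      have h6 := Int.add_mul_emod_self_left (a := e) (b := (xs.length : Int)) (c := 1)
      rw [mul_one] at h6
      exact h6
    have h4 : e % (xs.length : Int) = e + xs.length := by
      rw [← h5, Int.emod_eq_of_lt (by omega) (by omega)]
    have h3 : (PySem.Int.mod e (xs.length : Int)).toNat = (e + xs.length).toNat := by
      rw [hmod, h4]
    rw [h3]
    simp [PySem.List.pyGetD, PySem.List.pyGet?, PySem.List.pyIdx?, hneg, hidx, h1,
      List.getD_eq_getElem?_getD]

-- characterization of A's child-list construction: child[k] collects, in increasing
-- order, the nodes i ∈ [1, n) whose parent index is k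
lemma pvBuild_spec (parent : List Int)
    (hb : ∀ i : Nat, i < parent.length → 1 ≤ i →
        -(parent.length : Int) ≤ parent.getD i 0 ∧ parent.getD i 0 < (parent.length : Int)) :
    ∀ m, m ≤ parent.length →
      ((PySem.List.pyRange 1 (m : Int) 1).foldl
          (fun child i =>
            let p := PySem.List.pyGetD parent i 0
            PySem.List.pySetD child p (PySem.List.pyGetD child p [] ++ [i]))
          (List.replicate parent.length [])).length = parent.length ∧
      ∀ k, k < parent.length →
        ((PySem.List.pyRange 1 (m : Int) 1).foldl
            (fun child i =>
              let p := PySem.List.pyGetD parent i 0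
              PySem.List.pySetD child p (PySem.List.pyGetD child p [] ++ [i]))
            (List.replicate parent.length [])).getD k []
          = ((List.range' 1 (m - 1)).filter
              (fun j => decide (pvEpar parent j = k))).map (fun j => Int.ofNat j) := by
  intro m
  induction m with
  | zero =>
      intro _
      rw [PySem.List.pyRange_one_eq_nil (by omega)]
      simp
  | succ m ih =>
      intro hm1
      by_cases hm0 : m = 0
      · subst hm0
        rw [show (((1 : Nat) : Int)) = (1 : Int) by norm_num,
          PySem.List.pyRange_one_eq_nil (by omega)]
        simp
      · have hmn : m < parent.length := by omega
        obtain ⟨hlen, hget⟩ := ih (by omega)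
        have hcast : (((m + 1 : Nat)) : Int) = (m : Int) + 1 := by push_cast; ring
        rw [hcast, PySem.List.pyRange_one_succ_right (by omega), List.foldl_append,
          List.foldl_cons, List.foldl_nil]
        obtain ⟨hb1, hb2⟩ := hb m hmn (by omega)
        set C := ((PySem.List.pyRange 1 (m : Int) 1).foldl
          (fun child i =>
            let p := PySem.List.pyGetD parent i 0
            PySem.List.pySetD child p (PySem.List.pyGetD child p [] ++ [i]))
          (List.replicate parent.length [])) with hCdef
        set q := pvEpar parent m with hqdef
        have hqn : q < parent.length := pvEpar_lt (by omega) m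
        have hpm : PySem.List.pyGetD parent ((m : Nat) : Int) 0 = parent.getD m 0 := by
          rw [PySem.List.pyGetD_natCast]
        have hCget : PySem.List.pyGetD C (parent.getD m 0) [] = C.getD q [] := by
          rw [pvGetD_wrap C _ _ (by rw [hlen]; exact hb1) (by rw [hlen]; exact hb2)
            (by rw [hlen]; omega), hlen, hqdef]
          rfl
        have hCset : ∀ v, PySem.List.pySetD C (parent.getD m 0) v = C.set q v := by
          intro v
          rw [pvSetD_wrap C _ _ (by rw [hlen]; exact hb1) (by rw [hlen]; exact hb2)
            (by rw [hlen]; omega), hlen, hqdef]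
          rfl
        simp only [hpm, hCget, hCset]
        constructor
        · rw [List.length_set, hlen]
        · intro k hk
          have hrange : List.range' 1 (m + 1 - 1) = List.range' 1 (m - 1) ++ [m] := by
            have h2 : m + 1 - 1 = (m - 1) + 1 := by omega
            rw [h2, List.range'_1_concat]
            congr 2
            omega
          rw [hrange, List.filter_append, List.map_append,
            pvSet_getD C q k _ [] (by omega)]
          by_cases hkq : q = k
          · subst hkq
            rw [if_pos rfl, hget q hk]
            have hfm : List.filter (fun j => decide (pvEpar parent j = q)) [m] = [m] := by
              simp [hqdef]
            rw [hfm]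
            simp
          · rw [if_neg hkq, hget k hk]
            have hfm : List.filter (fun j => decide (pvEpar parent j = k)) [m] = [] := by
              have hne : pvEpar parent m ≠ k := fun hcontra => hkq (hqdef.trans hcontra)
              simp [hne]
            rw [hfm]
            simp


lemma pvR_iff {parent : List Int} {j i : Nat} :
    pvR parent j i = true ↔ ∃ s, s ≤ parent.length ∧ pvItW parent s j = i := by
  simp [pvR, List.any_eq_true, List.mem_range]

lemma pvR_self (parent : List Int) (i : Nat) : pvR parent i i = true :=
  pvR_iff.mpr ⟨0, by omega, rfl⟩

lemma pvR_root {parent : List Int} {k : Nat}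
    (hr : pvItW parent parent.length k = 0) : pvR parent k 0 = true :=
  pvR_iff.mpr ⟨parent.length, le_refl _, hr⟩

-- decomposition of reachability: k reaches i (k ≠ i) iff k reaches a child of i
lemma pvR_decomp (parent : List Int)
    (hreach : ∀ t : Nat, t < parent.length → pvItW parent parent.length t = 0)
    {k i : Nat} (hk : k < parent.length) (hne : k ≠ i) :
    pvR parent k i = (pvChildGe parent 1 i).any (fun c => pvR parent k c) := by
  by_cases h : pvR parent k i = true
  · rw [h]
    symm
    rw [List.any_eq_true]
    obtain ⟨s, hs, h0⟩ := pvR_iff.mp h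
    have hex : ∃ u, pvItW parent u k = i := ⟨s, h0⟩
    set s0 := Nat.find hex with hs0def
    have hs0 : pvItW parent s0 k = i := Nat.find_spec hex
    have hs0min : ∀ u, u < s0 → pvItW parent u k ≠ i := fun u hu => Nat.find_min hex hu
    have hs0le : s0 ≤ s := Nat.find_min' hex h0
    have hs0pos : 0 < s0 := by
      rcases Nat.eq_zero_or_pos s0 with h' | h'
      · exfalso
        rw [h'] at hs0
        exact hne hs0
      · exact h'
    set c := pvItW parent (s0 - 1) k with hcdef
    have hstep : pvItW parent s0 k = if c = 0 then 0 else pvEpar parent c := by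
      have : s0 = (s0 - 1) + 1 := by omega
      rw [this]
      simp only [pvItW]
      rw [← hcdef]
    have hc0 : c ≠ 0 := by
      intro hc
      rw [hc] at hstep
      simp at hstep
      rw [hstep] at hs0
      exact hs0min (s0 - 1) (by omega) (by rw [← hcdef, hc, ← hs0])
    have hec : pvEpar parent c = i := by
      rw [hstep, if_neg hc0] at hs0
      exact hs0
    refine ⟨c, pvChildGe_mem.mpr ⟨by omega, pvItW_lt hk (s0 - 1), hec⟩, ?_⟩
    exact pvR_iff.mpr ⟨s0 - 1, by omega, rfl⟩
  · rw [Bool.eq_false_iff.mpr h]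
    symm
    rw [List.any_eq_false]
    intro c hc
    have hcm := pvChildGe_mem.mp hc
    intro hRc
    apply h
    obtain ⟨t, ht, h0⟩ := pvR_iff.mp hRc
    have hdep := pvDep_spec (hreach k hk)
    have hdlt := pvDep_lt hk (hreach k hk)
    have htd : t < pvDep parent k := by
      by_contra hcon
      have : pvItW parent t k = 0 := pvItW_absorb hdep.1 (by omega)
      rw [h0] at this
      omega
    have hstep : pvItW parent (t + 1) k = i := by
      simp only [pvItW, h0]
      rw [if_neg (by omega), hcm.2.2]
    exact pvR_iff.mpr ⟨t + 1, by omega, hstep⟩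

-- the inner fold of size_tree over a child list
lemma pvFold_spec (parent files : List Int) (C : List (List Int)) (fuel : Nat)
    (IH : ∀ i' : Nat, i' < parent.length → fuel = parent.length - pvDep parent i' →
      ∀ sums : List (Option Int), sums.length = parent.length →
        (pvSizeTree C files fuel (i' : Int) sums).1 = pvVal parent files i' ∧
        (pvSizeTree C files fuel (i' : Int) sums).2.length = parent.length ∧
        ∀ k, k < parent.length →
          (pvSizeTree C files fuel (i' : Int) sums).2.getD k none
            = if pvR parent k i' then some (pvVal parent files k) else sums.getD k none) :
    ∀ cs : List Nat,
      (∀ j ∈ cs, j < parent.length ∧ fuel = parent.length - pvDep parent j) →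
    ∀ (a : Int) (sums : List (Option Int)), sums.length = parent.length →
      ((cs.map (fun j => Int.ofNat j)).foldl
          (fun (acc : Int × List (Option Int)) j =>
            (acc.1 + (pvSizeTree C files fuel j acc.2).1,
              (pvSizeTree C files fuel j acc.2).2)) (a, sums)).1
        = a + (cs.map (pvVal parent files)).sum ∧
      ((cs.map (fun j => Int.ofNat j)).foldl
          (fun (acc : Int × List (Option Int)) j =>
            (acc.1 + (pvSizeTree C files fuel j acc.2).1,
              (pvSizeTree C files fuel j acc.2).2)) (a, sums)).2.length = parent.length ∧
      ∀ k, k < parent.length →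
        ((cs.map (fun j => Int.ofNat j)).foldl
            (fun (acc : Int × List (Option Int)) j =>
              (acc.1 + (pvSizeTree C files fuel j acc.2).1,
                (pvSizeTree C files fuel j acc.2).2)) (a, sums)).2.getD k none
          = if cs.any (fun j => pvR parent k j) then some (pvVal parent files k)
            else sums.getD k none := by
  intro cs
  induction cs with
  | nil => intro _ a sums hlen; simp [hlen]
  | cons j t iht =>
      intro hmem a sums hlen
      have hj := hmem j List.mem_cons_self
      have h1 := IH j hj.1 hj.2 sums hlen
      simp only [List.map_cons, List.foldl_cons, Int.ofNat_eq_natCast]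
      have h2 := iht (fun x hx => hmem x (List.mem_cons_of_mem j hx))
        (a + (pvSizeTree C files fuel ((j : Nat) : Int) sums).1)
        (pvSizeTree C files fuel ((j : Nat) : Int) sums).2 h1.2.1
      simp only [Int.ofNat_eq_natCast] at h2
      refine ⟨?_, h2.2.1, ?_⟩
      · rw [h2.1, h1.1]
        simp [List.sum_cons]
        ring
      · intro k hk
        rw [h2.2.2 k hk, h1.2.2 k hk, List.any_cons]
        by_cases hc1 : t.any (fun j => pvR parent k j) <;>
          by_cases hc2 : pvR parent k j <;>
            simp [hc1, hc2]

-- size_tree with the fuel the actual run provides computes the node values and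
-- records them along the reachability cone
lemma pvSizeTree_spec (parent files : List Int)
    (hreach : ∀ t : Nat, t < parent.length → pvItW parent parent.length t = 0)
    (C : List (List Int))
    (hC : ∀ k, k < parent.length →
        C.getD k [] = (pvChildGe parent 1 k).map (fun j => Int.ofNat j)) :
    ∀ fuel : Nat, ∀ i : Nat, i < parent.length → fuel = parent.length - pvDep parent i →
      ∀ sums : List (Option Int), sums.length = parent.length →
        (pvSizeTree C files fuel (i : Int) sums).1 = pvVal parent files i ∧
        (pvSizeTree C files fuel (i : Int) sums).2.length = parent.length ∧
        ∀ k, k < parent.length →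
          (pvSizeTree C files fuel (i : Int) sums).2.getD k none
            = if pvR parent k i then some (pvVal parent files k) else sums.getD k none := by
  intro fuel
  induction fuel with
  | zero =>
      intro i hi hf
      exfalso
      have := pvDep_lt hi (hreach i hi)
      omega
  | succ f ihf =>
      intro i hi hf sums hlen
      have hCi : PySem.List.pyGetD C ((i : Nat) : Int) []
          = (pvChildGe parent 1 i).map (fun j => Int.ofNat j) := by
        rw [PySem.List.pyGetD_natCast, hC i hi]
      simp only [pvSizeTree, hCi]
      have hmem : ∀ j ∈ pvChildGe parent 1 i, j < parent.length ∧ f = parent.length - pvDep parent j := by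
        intro j hj
        have hm := pvChildGe_mem.mp hj
        refine ⟨hm.2.1, ?_⟩
        have hdj := pvDep_child (by omega) hm.2.2 (hreach j hm.2.1) (hreach i hi)
        have := pvDep_lt hm.2.1 (hreach j hm.2.1)
        omega
      have hfold := pvFold_spec parent files C f ihf (pvChildGe parent 1 i) hmem 0 sums hlen
      simp only [Int.ofNat_eq_natCast] at hfold ⊢
      set r := ((pvChildGe parent 1 i).map (fun j => ((j : Nat) : Int))).foldl
          (fun (acc : Int × List (Option Int)) j =>
            (acc.1 + (pvSizeTree C files f j acc.2).1,
              (pvSizeTree C files f j acc.2).2)) ((0 : Int), sums) with hrdef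
      have hv : PySem.List.pyGetD files ((i : Nat) : Int) 0 + r.1 = pvVal parent files i := by
        rw [PySem.List.pyGetD_natCast, hfold.1]
        have hmapeq : (pvChildGe parent 1 i).map (pvVal parent files)
            = (pvChildGe parent 1 i).map (pvV parent files f) := by
          apply List.map_congr_left
          intro j hj
          unfold pvVal
          rw [(hmem j hj).2]
        rw [hmapeq]
        unfold pvVal
        rw [← hf]
        simp only [pvV]
        ring
      refine ⟨hv, ?_, ?_⟩
      · rw [PySem.List.pySetD_natCast, List.length_set, hfold.2.1]
      · intro k hk
        rw [PySem.List.pySetD_natCast,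
          pvSet_getD r.2 i k _ none (by rw [hfold.2.1]; exact hi)]
        by_cases hki : i = k
        · subst hki
          rw [if_pos rfl, pvR_self, if_pos rfl, hv]
        · rw [if_neg hki, hfold.2.2 k hk,
            pvR_decomp parent hreach hk (fun h => hki h.symm)]


-- Python's modulus of a strictly in-range value
lemma pvMod_small (e L : Int) (h1 : -L < e) (h2 : e < L) (hL : 0 < L) :
    PySem.Int.mod e L = if 0 ≤ e then e else e + L := by
  rw [PySem.Int.mod_eq_emod_of_pos hL]
  split_ifs with h
  · exact Int.emod_eq_of_lt h h2
  · have h5 : (e + L) % L = e % L := by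
      have h6 := Int.add_mul_emod_self_left (a := e) (b := L) (c := 1)
      rw [mul_one] at h6
      exact h6
    rw [← h5, Int.emod_eq_of_lt (by omega) (by omega)]

-- Source B's inner while loop: starting from a raw index value e denoting the node s steps
-- up j's chain, it adds files_size[j] once to every strictly later node of the chain
-- and stops at the root
lemma pvBWalk_spec (parent files : List Int)
    (hreach : ∀ t : Nat, t < parent.length → pvItW parent parent.length t = 0)
    (hb : ∀ i : Nat, i < parent.length → 1 ≤ i →
        -(parent.length : Int) < parent.getD i 0 ∧ parent.getD i 0 < (parent.length : Int))
    {j : Nat} (hj : j < parent.length) :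
    ∀ fuel s (e : Int) totals, s ≤ pvDep parent j → pvDep parent j - s ≤ fuel →
      -(parent.length : Int) < e → e < (parent.length : Int) →
      (PySem.Int.mod e (parent.length : Int)).toNat = pvItW parent s j →
      totals.length = parent.length →
      (pvBWalk parent files (j : Int) fuel e totals).length = parent.length ∧
      ∀ m, m < parent.length →
        (pvBWalk parent files (j : Int) fuel e totals).getD m 0
          = totals.getD m 0 +
            (if (∃ u, u ≤ pvDep parent j ∧ s < u ∧ pvItW parent u j = m)
             then files.getD j 0 else 0) := by
  have hdep := pvDep_spec (hreach j hj)
  have hdlt := pvDep_lt hj (hreach j hj)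
  intro fuel
  induction fuel with
  | zero =>
      intro s e totals hs hf he1 he2 hmod hlen
      have hsd : s = pvDep parent j := by omega
      simp only [pvBWalk]
      refine ⟨hlen, ?_⟩
      intro m hm
      rw [if_neg]
      · ring
      · rintro ⟨u, hu1, hu2, _⟩
        omega
  | succ f ihf =>
      intro s e totals hs hf he1 he2 hmod hlen
      have hL : (0 : Int) < (parent.length : Int) := by omega
      have hmsmall : PySem.Int.mod e (parent.length : Int) = if 0 ≤ e then e else e + parent.length :=
        pvMod_small e _ he1 he2 hL
      have hez : e = 0 ↔ pvItW parent s j = 0 := by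
        rw [← hmod, hmsmall]
        split_ifs with h <;> omega
      by_cases hk0 : pvItW parent s j = 0
      · -- at the root: while condition fails, nothing more is added
        have hezero : e = 0 := hez.mpr hk0
        simp only [pvBWalk, if_pos hezero]
        have hsd : s = pvDep parent j := by
          by_contra hc
          exact hdep.2 s (by omega) hk0
        refine ⟨hlen, ?_⟩
        intro m hm
        rw [if_neg]
        · ring
        · rintro ⟨u, hu1, hu2, _⟩
          omega
      · -- interior node: step to the parent and add there
        have hsd : s < pvDep parent j := by
          rcases Nat.eq_or_lt_of_le hs with h | h
          · exfalso; apply hk0; rw [h]; exact hdep.1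
          · exact h
        set k := pvItW parent s j with hkdef
        have hkn : k < parent.length := pvItW_lt hj s
        obtain ⟨hb0, hb1⟩ := hb k hkn (by omega)
        have henz : ¬ (e = 0) := fun h => hk0 (hez.mp h)
        have hstep : pvItW parent (s + 1) j = pvEpar parent k := by
          simp only [pvItW]
          rw [← hkdef, if_neg hk0]
        have hparget : PySem.List.pyGetD parent e 0 = parent.getD k 0 := by
          rw [pvGetD_wrap parent e 0 (by omega) he2 (by omega), hmod]
        simp only [pvBWalk, if_neg henz, hparget]
        set p := pvEpar parent k with hpdef
        have hpn : p < parent.length := pvEpar_lt (by omega) k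
        have hmod' : (PySem.Int.mod (parent.getD k 0) (parent.length : Int)).toNat
            = pvItW parent (s + 1) j := by
          rw [hstep, hpdef]
          rfl
        have htotget : PySem.List.pyGetD totals (parent.getD k 0) 0 = totals.getD p 0 := by
          rw [pvGetD_wrap totals (parent.getD k 0) 0 (by omega : -(totals.length : Int) ≤ _)
              (by omega : parent.getD k 0 < (totals.length : Int)) (by omega), hlen]
          rfl
        have htotset : PySem.List.pySetD totals (parent.getD k 0)
              (totals.getD p 0 + files.getD j 0)
            = totals.set p (totals.getD p 0 + files.getD j 0) := by
          rw [pvSetD_wrap totals (parent.getD k 0) _ (by omega : -(totals.length : Int) ≤ _)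
              (by omega : parent.getD k 0 < (totals.length : Int)) (by omega), hlen]
          rfl
        rw [show PySem.List.pyGetD files (((j : Nat)) : Int) 0 = files.getD j 0 from
          PySem.List.pyGetD_natCast _ _ _]
        rw [htotget, htotset]
        have hrec := ihf (s + 1) (parent.getD k 0)
          (totals.set p (totals.getD p 0 + files.getD j 0))
          (by omega) (by omega) hb0 hb1 (by rw [hmod', hstep])
          (by rw [List.length_set, hlen])
        refine ⟨hrec.1, ?_⟩
        intro m hm
        rw [hrec.2 m hm,
          pvSet_getD totals p m (totals.getD p 0 + files.getD j 0) 0 (by omega)]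
        by_cases hmp : p = m
        · -- the node just added: no later chain node equals it
          have hnex1 : ¬ ∃ u, u ≤ pvDep parent j ∧ s + 1 < u ∧ pvItW parent u j = m := by
            rintro ⟨u, hu1, hu2, hu3⟩
            have heq : pvItW parent (s + 1) j = pvItW parent u j := by
              rw [hstep, hu3, ← hmp, hpdef]
            exact pvItW_inj hdep.1 hdep.2 (by omega : s + 1 < u) hu1 heq
          rw [if_neg hnex1, if_pos hmp,
            if_pos ⟨s + 1, by omega, by omega, by rw [hstep]; exact hmp⟩, hmp]
          ring
        · rw [if_neg hmp]
          congr 1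
          by_cases hex : ∃ u, u ≤ pvDep parent j ∧ s + 1 < u ∧ pvItW parent u j = m
          · rw [if_pos hex]
            obtain ⟨u, hu1, hu2, hu3⟩ := hex
            rw [if_pos ⟨u, hu1, by omega, hu3⟩]
          · rw [if_neg hex, if_neg]
            rintro ⟨u, hu1, hu2, hu3⟩
            apply hex
            refine ⟨u, hu1, ?_, hu3⟩
            rcases Nat.eq_or_lt_of_le (by omega : s + 1 ≤ u) with h | h
            · exfalso; apply hmp; rw [← hstep, h, hu3]
            · omega


lemma pvCond_iff (parent : List Int)
    (hreach : ∀ t : Nat, t < parent.length → pvItW parent parent.length t = 0)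
    {m k : Nat} (hm : m < parent.length) :
    (∃ u, u ≤ pvDep parent m ∧ pvItW parent u m = k) ↔ pvR parent m k = true := by
  have hdlt := pvDep_lt hm (hreach m hm)
  constructor
  · rintro ⟨u, hu1, hu3⟩
    exact pvR_iff.mpr ⟨u, by omega, hu3⟩
  · intro h
    obtain ⟨u, hu1, hu2⟩ := pvR_iff.mp h
    by_cases hud : u ≤ pvDep parent m
    · exact ⟨u, hud, hu2⟩
    · have h0 : pvItW parent u m = 0 :=
        pvItW_absorb (pvDep_spec (hreach m hm)).1 (by omega)
      refine ⟨pvDep parent m, le_refl _, ?_⟩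
      rw [(pvDep_spec (hreach m hm)).1, ← hu2, h0]

-- the outer loop of Source B: after processing nodes [0, m), totals[k] holds the sum of
-- files_size[j] over processed j whose chain passes through k
lemma pvBLoop_spec (parent files : List Int)
    (hreach : ∀ t : Nat, t < parent.length → pvItW parent parent.length t = 0)
    (hb : ∀ i : Nat, i < parent.length → 1 ≤ i →
        -(parent.length : Int) < parent.getD i 0 ∧ parent.getD i 0 < (parent.length : Int)) :
    ∀ m, m ≤ parent.length →
      ((PySem.List.pyRange 0 (m : Int) 1).foldl
          (fun totals j =>
            pvBWalk parent files j parent.length j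
              (PySem.List.pySetD totals j
                (PySem.List.pyGetD totals j 0 + PySem.List.pyGetD files j 0)))
          (List.replicate parent.length (0 : Int))).length = parent.length ∧
      ∀ k, k < parent.length →
        ((PySem.List.pyRange 0 (m : Int) 1).foldl
            (fun totals j =>
              pvBWalk parent files j parent.length j
                (PySem.List.pySetD totals j
                  (PySem.List.pyGetD totals j 0 + PySem.List.pyGetD files j 0)))
            (List.replicate parent.length (0 : Int))).getD k 0
          = ∑ j ∈ Finset.range m, (if pvR parent j k = true then files.getD j 0 else 0) := by
  intro m
  induction m with
  | zero =>
      intro _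
      rw [PySem.List.pyRange_one_eq_nil (by omega)]
      simp
  | succ m ih =>
      intro hm1
      have hmn : m < parent.length := by omega
      obtain ⟨hlen, hget⟩ := ih (by omega)
      have hcast : (((m + 1 : Nat)) : Int) = (m : Int) + 1 := by push_cast; ring
      rw [hcast, PySem.List.pyRange_one_succ_right (by omega), List.foldl_append,
        List.foldl_cons, List.foldl_nil]
      have hdep := pvDep_spec (hreach m hmn)
      have hdlt := pvDep_lt hmn (hreach m hmn)
      set T := ((PySem.List.pyRange 0 (m : Int) 1).foldl
          (fun totals j =>
            pvBWalk parent files j parent.length j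
              (PySem.List.pySetD totals j
                (PySem.List.pyGetD totals j 0 + PySem.List.pyGetD files j 0)))
          (List.replicate parent.length (0 : Int))) with hTdef
      have hset : PySem.List.pySetD T ((m : Nat) : Int)
            (PySem.List.pyGetD T ((m : Nat) : Int) 0
              + PySem.List.pyGetD files ((m : Nat) : Int) 0)
          = T.set m (T.getD m 0 + files.getD m 0) := by
        rw [PySem.List.pySetD_natCast, PySem.List.pyGetD_natCast, PySem.List.pyGetD_natCast]
      rw [hset]
      have hmodm : (PySem.Int.mod ((m : Nat) : Int) (parent.length : Int)).toNat
          = pvItW parent 0 m := by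
        rw [PySem.Int.mod_eq_emod_of_pos (by omega : (0 : Int) < (parent.length : Int)),
          Int.emod_eq_of_lt (by omega) (by omega)]
        simp [pvItW]
      have hw := pvBWalk_spec parent files hreach hb hmn parent.length 0 ((m : Nat) : Int)
        (T.set m (T.getD m 0 + files.getD m 0)) (by omega) (by omega)
        (by omega) (by omega) hmodm
        (by rw [List.length_set, hlen])
      refine ⟨hw.1, ?_⟩
      intro k hk
      rw [hw.2 k hk, pvSet_getD T m k (T.getD m 0 + files.getD m 0) 0 (by omega),
        Finset.sum_range_succ]
      have hcond : (if pvR parent m k = true then files.getD m 0 else 0)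
          = (if m = k then files.getD m 0 else 0)
            + (if (∃ u, u ≤ pvDep parent m ∧ 0 < u ∧ pvItW parent u m = k)
               then files.getD m 0 else 0) := by
        by_cases hmk : m = k
        · subst hmk
          rw [if_pos rfl, if_pos (pvR_self parent m), if_neg]
          · ring
          · rintro ⟨u, hu1, hu2, hu3⟩
            exact pvItW_inj hdep.1 hdep.2 hu2 hu1 (by rw [hu3]; rfl)
        · rw [if_neg hmk]
          have hiff : pvR parent m k = true ↔
              ∃ u, u ≤ pvDep parent m ∧ 0 < u ∧ pvItW parent u m = k := by
            rw [← pvCond_iff parent hreach hmn]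
            constructor
            · rintro ⟨u, hu1, hu3⟩
              refine ⟨u, hu1, ?_, hu3⟩
              rcases Nat.eq_zero_or_pos u with h | h
              · exfalso; apply hmk; rw [← hu3, h]; rfl
              · exact h
            · rintro ⟨u, hu1, _, hu3⟩
              exact ⟨u, hu1, hu3⟩
          by_cases hr : pvR parent m k = true
          · rw [if_pos hr, if_pos (hiff.mp hr)]
            ring
          · rw [if_neg hr, if_neg (fun hex => hr (hiff.mpr hex))]
            ring
      by_cases hmk : m = k
      · subst hmk
        rw [if_pos rfl, hcond, if_pos rfl, hget m (by omega)]
        ring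
      · rw [if_neg hmk, hcond, if_neg hmk, hget k hk]
        ring

lemma pvListFinsetSwap {α : Type} (S : Finset Nat) (g : α → Nat → Int) :
    ∀ cs : List α,
      (cs.map (fun c => ∑ j ∈ S, g c j)).sum = ∑ j ∈ S, (cs.map (fun c => g c j)).sum := by
  intro cs
  induction cs with
  | nil => simp
  | cons c t ih => simp [ih, Finset.sum_add_distrib]

lemma pvSumUnique (v : Int) (p : Nat → Bool) :
    ∀ cs : List Nat, cs.Nodup →
      (∀ c1 ∈ cs, ∀ c2 ∈ cs, p c1 = true → p c2 = true → c1 = c2) →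
      (cs.map (fun c => if p c = true then v else 0)).sum
        = if cs.any p = true then v else 0 := by
  intro cs
  induction cs with
  | nil => simp
  | cons c t ih =>
      intro hnd huniq
      simp only [List.map_cons, List.sum_cons, List.any_cons]
      by_cases hc : p c = true
      · have ht : t.any p = false := by
          rw [List.any_eq_false]
          intro x hx hpx
          have hcx := huniq c List.mem_cons_self x (List.mem_cons_of_mem c hx) hc hpx
          rw [List.nodup_cons] at hnd
          exact hnd.1 (hcx ▸ hx)
        rw [ih (List.nodup_cons.mp hnd).2
          (fun c1 h1 c2 h2 => huniq c1 (List.mem_cons_of_mem c h1) c2 (List.mem_cons_of_mem c h2))]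
        simp [hc, ht]
      · rw [ih (List.nodup_cons.mp hnd).2
          (fun c1 h1 c2 h2 => huniq c1 (List.mem_cons_of_mem c h1) c2 (List.mem_cons_of_mem c h2))]
        simp [hc]

lemma pvChildGe_nodup (parent : List Int) (m k : Nat) : (pvChildGe parent m k).Nodup :=
  (List.nodup_range' ).filter _

-- a node never reaches one of its own children
lemma pvSelf_no_child (parent : List Int)
    (hreach : ∀ t : Nat, t < parent.length → pvItW parent parent.length t = 0)
    {k : Nat} (hk : k < parent.length) :
    ∀ c ∈ pvChildGe parent 1 k, pvR parent k c = false := by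
  intro c hc
  have hcm := pvChildGe_mem.mp hc
  rw [Bool.eq_false_iff]
  intro hR
  obtain ⟨t, ht, h0⟩ := pvR_iff.mp hR
  have hdep := pvDep_spec (hreach k hk)
  have hdlt := pvDep_lt hk (hreach k hk)
  have htd : t < pvDep parent k := by
    by_contra hcon
    have : pvItW parent t k = 0 := pvItW_absorb hdep.1 (by omega)
    omega
  have hstep : pvItW parent (t + 1) k = k := by
    simp only [pvItW, h0]
    rw [if_neg (by omega), hcm.2.2]
  by_cases hk0 : k = 0
  · subst hk0
    rw [pvItW_zero] at h0
    omega
  · refine pvItW_inj hdep.1 hdep.2 (by omega : 0 < t + 1) (by omega) ?_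
    rw [hstep]
    rfl

-- a node reaches at most one child of any given node
lemma pvChild_unique (parent : List Int)
    (hreach : ∀ t : Nat, t < parent.length → pvItW parent parent.length t = 0)
    {j k : Nat} (hj : j < parent.length) :
    ∀ c1 ∈ pvChildGe parent 1 k, ∀ c2 ∈ pvChildGe parent 1 k,
      pvR parent j c1 = true → pvR parent j c2 = true → c1 = c2 := by
  have hdep := pvDep_spec (hreach j hj)
  have hdlt := pvDep_lt hj (hreach j hj)
  have key : ∀ c1 ∈ pvChildGe parent 1 k, ∀ c2 ∈ pvChildGe parent 1 k,
      ∀ t1 t2, pvItW parent t1 j = c1 → pvItW parent t2 j = c2 → t1 < t2 → False := by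
    intro c1 hc1 c2 hc2 t1 t2 h1 h2 hlt
    have hm1 := pvChildGe_mem.mp hc1
    have hm2 := pvChildGe_mem.mp hc2
    have ht1d : t1 < pvDep parent j := by
      by_contra hcon
      have : pvItW parent t1 j = 0 := pvItW_absorb hdep.1 (by omega)
      omega
    have ht2d : t2 < pvDep parent j := by
      by_contra hcon
      have : pvItW parent t2 j = 0 := pvItW_absorb hdep.1 (by omega)
      omega
    have hs1 : pvItW parent (t1 + 1) j = k := by
      simp only [pvItW, h1]
      rw [if_neg (by omega), hm1.2.2]
    have hs2 : pvItW parent (t2 + 1) j = k := by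
      simp only [pvItW, h2]
      rw [if_neg (by omega), hm2.2.2]
    exact pvItW_inj hdep.1 hdep.2 (by omega : t1 + 1 < t2 + 1) (by omega)
      (by rw [hs1, hs2])
  intro c1 hc1 c2 hc2 hR1 hR2
  obtain ⟨t1, ht1, h1⟩ := pvR_iff.mp hR1
  obtain ⟨t2, ht2, h2⟩ := pvR_iff.mp hR2
  rcases Nat.lt_trichotomy t1 t2 with h | h | h
  · exact absurd (key c1 hc1 c2 hc2 t1 t2 h1 h2 h) (by simp)
  · rw [← h1, ← h2, h]
  · exact absurd (key c2 hc2 c1 hc1 t2 t1 h2 h1 h) (by simp)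


-- the closed form of the node value: sum of files_size over the nodes whose chain passes through k
lemma pvVal_eq_sum (parent files : List Int)
    (hreach : ∀ t : Nat, t < parent.length → pvItW parent parent.length t = 0) :
    ∀ d k, k < parent.length → parent.length - pvDep parent k = d →
      pvVal parent files k = ∑ j ∈ Finset.range parent.length,
        (if pvR parent j k = true then files.getD j 0 else 0) := by
  intro d
  induction d using Nat.strong_induction_on with
  | _ d IH =>
    intro k hk hd
    have hdlt := pvDep_lt hk (hreach k hk)
    have hd1 : 1 ≤ d := by omega
    have hunfold : pvVal parent files k
        = files.getD k 0 + ((pvChildGe parent 1 k).map (pvV parent files (d - 1))).sum := by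
      unfold pvVal
      rw [hd]
      have hdd : d = (d - 1) + 1 := by omega
      rw [hdd]
      simp only [pvV, Nat.add_sub_cancel]
    have hchild : ∀ c ∈ pvChildGe parent 1 k, pvV parent files (d - 1) c
        = ∑ j ∈ Finset.range parent.length,
            (if pvR parent j c = true then files.getD j 0 else 0) := by
      intro c hc
      have hcm := pvChildGe_mem.mp hc
      have hdc := pvDep_child (by omega) hcm.2.2 (hreach c hcm.2.1) (hreach k hk)
      have hdcl := pvDep_lt hcm.2.1 (hreach c hcm.2.1)
      have hfc : d - 1 = parent.length - pvDep parent c := by omega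
      have hIH := IH (parent.length - pvDep parent c) (by omega) c hcm.2.1 rfl
      rw [hfc]
      unfold pvVal at hIH
      exact hIH
    rw [hunfold, List.map_congr_left hchild, pvListFinsetSwap]
    have hpoint : ∀ j ∈ Finset.range parent.length,
        ((pvChildGe parent 1 k).map
            (fun c => if pvR parent j c = true then files.getD j 0 else 0)).sum
          = if j = k then 0 else (if pvR parent j k = true then files.getD j 0 else 0) := by
      intro j hjmem
      have hj : j < parent.length := Finset.mem_range.mp hjmem
      rw [pvSumUnique (files.getD j 0) (fun c => pvR parent j c) _
        (pvChildGe_nodup parent 1 k) (pvChild_unique parent hreach hj)]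
      by_cases hjk : j = k
      · subst hjk
        rw [if_pos rfl]
        have hany : (pvChildGe parent 1 j).any (fun c => pvR parent j c) = false := by
          rw [List.any_eq_false]
          intro c hc
          rw [pvSelf_no_child parent hreach hj c hc]
          simp
        rw [hany]
        simp
      · rw [if_neg hjk, ← pvR_decomp parent hreach hj hjk]
    rw [Finset.sum_congr rfl hpoint]
    have hsplit : ∀ j ∈ Finset.range parent.length,
        (if pvR parent j k = true then files.getD j 0 else 0)
          = (if j = k then files.getD k 0 else 0)
            + (if j = k then 0 else (if pvR parent j k = true then files.getD j 0 else 0)) := by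
      intro j _
      by_cases hjk : j = k
      · subst hjk
        rw [if_pos rfl, if_pos rfl, if_pos (pvR_self parent j)]
        ring
      · rw [if_neg hjk, if_neg hjk]
        ring
    rw [Finset.sum_congr rfl hsplit, Finset.sum_add_distrib,
      Finset.sum_ite_eq' (Finset.range parent.length) k (fun _ => files.getD k 0),
      if_pos (Finset.mem_range.mpr hk)]

-- ===== VERDICT (by name: the statement is the Claim_ definition above) =====
theorem mostBalancedPartition_spec : Claim_equal_mostBalancedPartition := by
  intro parent files _hdom hpre
  obtain ⟨hn2, hflen, hb, hreach⟩ := hpre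
  unfold Spec_mostBalancedPartition
  have hb' : ∀ i : Nat, i < parent.length → 1 ≤ i →
      -(parent.length : Int) ≤ parent.getD i 0 ∧ parent.getD i 0 < (parent.length : Int) := by
    intro i h1 h2
    have := hb i h1 h2
    omega
  -- A side: characterize the built child lists
  have hbuild := pvBuild_spec parent hb' parent.length (le_refl _)
  have hCeq : ∀ k, k < parent.length → (pvBuildChild parent parent.length).getD k []
      = (pvChildGe parent 1 k).map (fun j => Int.ofNat j) := by
    intro k hk
    have h1 := hbuild.2 k hk
    unfold pvBuildChild
    exact h1
  have hdz : parent.length = parent.length - pvDep parent 0 := by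
    rw [pvDep_zero parent (by omega)]
    omega
  have hA := pvSizeTree_spec parent files hreach (pvBuildChild parent parent.length) hCeq
    parent.length 0 (by omega) hdz (List.replicate parent.length none) (by simp)
  simp only [Nat.cast_zero] at hA
  obtain ⟨_hA1, hAlen, hAget⟩ := hA
  have hAget' : ∀ k, k < parent.length →
      (pvSizeTree (pvBuildChild parent parent.length) files parent.length 0
          (List.replicate parent.length none)).2.getD k none
        = some (pvVal parent files k) := by
    intro k hk
    rw [hAget k hk, if_pos (pvR_root (hreach k hk))]
  -- B side
  have hB := pvBLoop_spec parent files hreach hb parent.length (le_refl _)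
  obtain ⟨hBlen, hBget⟩ := hB
  set A2 := (pvSizeTree (pvBuildChild parent parent.length) files parent.length 0
    (List.replicate parent.length none)).2 with hA2def
  set S := (PySem.List.pyRange 0 (parent.length : Int) 1).foldl
      (fun totals j =>
        pvBWalk parent files j parent.length j
          (PySem.List.pySetD totals j
            (PySem.List.pyGetD totals j 0 + PySem.List.pyGetD files j 0)))
      (List.replicate parent.length (0 : Int)) with hSdef
  have hBget' : ∀ k, k < parent.length → S.getD k 0 = pvVal parent files k := by
    intro k hk
    rw [hSdef, hBget k hk, ← pvVal_eq_sum parent files hreach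
      (parent.length - pvDep parent k) k hk rfl]
  -- final expressions
  simp only [mostBalancedPartition, mostBalancedPartition_alt, PySem.List.slice_from_one]
  have hrootA : (PySem.List.pyGetD A2 0 none).getD 0 = pvVal parent files 0 := by
    rw [PySem.List.pyGetD_zero, hAget' 0 (by omega)]
    rfl
  have hrootB : PySem.List.pyGetD S 0 0 = pvVal parent files 0 := by
    rw [PySem.List.pyGetD_zero]
    exact hBget' 0 (by omega)
  rw [hrootA, hrootB]
  have hlists : A2.tail.map (fun o => |pvVal parent files 0 - 2 * o.getD 0|)
      = S.tail.map (fun s => |pvVal parent files 0 - 2 * s|) := by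
    apply List.ext_getElem?
    intro k
    simp only [List.getElem?_map, List.getElem?_tail]
    by_cases hk : k + 1 < parent.length
    · have e1 : A2[k + 1]? = some (some (pvVal parent files (k + 1))) := by
        have h := hAget' (k + 1) hk
        rw [List.getD_eq_getElem?_getD, List.getElem?_eq_getElem (by omega : k + 1 < A2.length),
          Option.getD_some] at h
        rw [List.getElem?_eq_getElem (by omega : k + 1 < A2.length), h]
      have e2 : S[k + 1]? = some (pvVal parent files (k + 1)) := by
        have h := hBget' (k + 1) hk
        rw [List.getD_eq_getElem?_getD, List.getElem?_eq_getElem (by omega : k + 1 < S.length),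
          Option.getD_some] at h
        rw [List.getElem?_eq_getElem (by omega : k + 1 < S.length), h]
      rw [e1, e2]
      simp
    · have e1 : A2[k + 1]? = none := List.getElem?_eq_none (by omega)
      have e2 : S[k + 1]? = none := List.getElem?_eq_none (by omega)
      rw [e1, e2]
      simp
  rw [hlists]
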